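-- pv_equiv track=rewrite | github.com/Evilnames/Collector | sculpture.py | _make_frame_grid
-- ===== SOURCE A (Python) =====
-- def _empty(h):
--     return [[False] * 8 for _ in range(h * 4)]
--
-- def _make_frame_grid(height):
--     rows = height * 4
--     g    = _empty(height)
--     for r in range(rows):
--         if r < 2 or r >= rows - 2:
--             g[r] = [True] * 8
--         else:
--             g[r][0] = g[r][1] = g[r][6] = g[r][7] = True
--     return g
-- ===== SOURCE B (Python) =====
-- def _make_frame_grid(height):
--     if height <= 0:
--         return []
--     cap = [[True] * 8 for _ in range(2)]
--     body = [[True, True, False, False, False, False, True, True]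
--             for _ in range(height * 4 - 4)]
--     return cap + body + [[True] * 8 for _ in range(2)]
-- ===== Notes on version B (the rewrite author's own statement) =====
-- stated objective: alternative
-- what changed: Builds the grid by concatenating three precomputed slabs (2 solid cap rows, height*4-4 middle rows, 2 solid cap rows) instead of iterating over row indices and testing/overwriting each row of an all-False grid; no per-row border condition remains.
import Mathlib
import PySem

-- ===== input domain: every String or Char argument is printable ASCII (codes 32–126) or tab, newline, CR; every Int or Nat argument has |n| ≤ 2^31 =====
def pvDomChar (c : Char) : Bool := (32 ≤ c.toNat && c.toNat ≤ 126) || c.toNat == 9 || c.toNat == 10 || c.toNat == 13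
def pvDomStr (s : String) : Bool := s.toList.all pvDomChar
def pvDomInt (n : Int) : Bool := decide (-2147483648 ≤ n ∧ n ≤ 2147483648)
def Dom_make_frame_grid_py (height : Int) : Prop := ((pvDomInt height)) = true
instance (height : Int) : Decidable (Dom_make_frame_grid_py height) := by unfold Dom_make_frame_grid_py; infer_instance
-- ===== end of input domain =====

-- B builds the grid as a concatenation of three precomputed slabs instead of A's allocate-then-overwrite row loop (objective: alternative).


-- ===== PORT A =====
-- helper _empty(h)
def empty_py (h : Int) : List (List Bool) :=
  (PySem.List.pyRange 0 (h * 4) 1).map (fun _ => List.replicate 8 false)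

-- loop body of A's for-loop (g[r] assignments modelled with pySetD/pyGetD)
def stepA (rows : Int) (g : List (List Bool)) (r : Int) : List (List Bool) :=
  if r < 2 ∨ r ≥ rows - 2 then
    PySem.List.pySetD g r (List.replicate 8 true)
  else
    let row := PySem.List.pyGetD g r []
    let row := PySem.List.pySetD row 0 true
    let row := PySem.List.pySetD row 1 true
    let row := PySem.List.pySetD row 6 true
    let row := PySem.List.pySetD row 7 true
    PySem.List.pySetD g r row

def make_frame_grid_py (height : Int) : List (List Bool) :=
  let rows := height * 4
  let g := empty_py height
  (PySem.List.pyRange 0 rows 1).foldl (stepA rows) g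

-- ===== PORT B =====
def make_frame_grid_py_alt (height : Int) : List (List Bool) :=
  if height ≤ 0 then []
  else
    let cap := List.replicate 2 (List.replicate 8 true)
    let body := List.replicate (height * 4 - 4).toNat
      [true, true, false, false, false, false, true, true]
    cap ++ body ++ List.replicate 2 (List.replicate 8 true)

-- ===== PRECONDITION & SPEC =====
def Spec_make_frame_grid_py (height : Int) (out : List (List Bool)) : Prop := out = make_frame_grid_py_alt height
instance (height : Int) (out : List (List Bool)) : Decidable (Spec_make_frame_grid_py height out) := by unfold Spec_make_frame_grid_py; infer_instance

-- ===== CLAIM (what is proved, stated in full; the proofs are below) =====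
def Claim_equal_make_frame_grid_py : Prop := ∀ (height : Int), Dom_make_frame_grid_py height → Spec_make_frame_grid_py height (make_frame_grid_py height)

-- ===== LEMMAS AND PROOFS =====

-- the row A's loop produces for row index k (as a function of k alone)
def rowA (rows : Int) (k : Nat) : List Bool :=
  if (k : Int) < 2 ∨ (k : Int) ≥ rows - 2 then List.replicate 8 true
  else [true, true, false, false, false, false, true, true]

-- invariant of A's loop: after processing range m, the first m rows are rowA, the rest untouched
lemma foldl_stepA (rows : Int) (n : Nat) :
    ∀ m : Nat, m ≤ n →
      (((List.range m).map (fun (k : Nat) => (k : Int))).foldl (stepA rows)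
          ((List.range n).map (fun _ => List.replicate 8 false)))
      = (List.range n).map (fun k => if k < m then rowA rows k else List.replicate 8 false) := by
  intro m
  induction m with
  | zero => intro _; simp
  | succ m ih =>
    intro hm
    have hmn : m < n := by omega
    rw [List.range_succ, List.map_append, List.foldl_append, ih (by omega)]
    simp only [List.map_cons, List.map_nil, List.foldl_cons, List.foldl_nil]
    have hget : PySem.List.pyGetD
        ((List.range n).map (fun k => if k < m then rowA rows k else List.replicate 8 false))
        ((m : Nat) : Int) ([] : List Bool)
        = List.replicate 8 false := by
      rw [PySem.List.pyGetD_natCast]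
      simp [List.getD, List.getElem?_map, List.getElem?_range hmn]
    unfold stepA
    by_cases hc : ((m : Nat) : Int) < 2 ∨ ((m : Nat) : Int) ≥ rows - 2
    · rw [if_pos hc, PySem.List.pySetD_natCast]
      apply List.ext_getElem
      · simp
      · intro j hj hj'
        simp only [List.length_map, List.length_range] at hj'
        rcases eq_or_ne j m with hje | hne
        · subst hje
          rw [List.getElem_set_self (by simpa using hmn)]
          simp only [List.getElem_map, List.getElem_range]
          rw [if_pos (Nat.lt_succ_self j), rowA, if_pos hc]
        · rw [List.getElem_set_ne (by omega)]
          simp only [List.getElem_map, List.getElem_range]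
          have : j < m ↔ j < m + 1 := by omega
          simp [this]
    · rw [if_neg hc]
      simp only [hget]
      rw [PySem.List.pySetD_natCast]
      apply List.ext_getElem
      · simp
      · intro j hj hj'
        simp only [List.length_map, List.length_range] at hj'
        rcases eq_or_ne j m with hje | hne
        · subst hje
          rw [List.getElem_set_self (by simpa using hmn)]
          simp only [List.getElem_map, List.getElem_range]
          rw [if_pos (Nat.lt_succ_self j), rowA, if_neg hc]
          decide
        · rw [List.getElem_set_ne (by omega)]
          simp only [List.getElem_map, List.getElem_range]
          have : j < m ↔ j < m + 1 := by omega
          simp [this]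

-- the rowA rows, listed for k = 0..n-1, are exactly B's three slabs when rows = n ≥ 4
lemma map_rowA_blocks (n : Nat) (hn : 4 ≤ n) :
    (List.range n).map (fun k => rowA (n : Int) k)
    = List.replicate 2 (List.replicate 8 true)
      ++ List.replicate (n - 4) [true, true, false, false, false, false, true, true]
      ++ List.replicate 2 (List.replicate 8 true) := by
  apply List.ext_getElem
  · simp; omega
  · intro j hj hj'
    simp only [List.length_map, List.length_range] at hj
    simp only [List.getElem_map, List.getElem_range]
    rw [rowA]
    by_cases h2 : j < 2
    · rw [if_pos (Or.inl (by exact_mod_cast h2))]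
      rw [List.getElem_append_left (by simp; omega)]
      rw [List.getElem_append_left (by simp; omega)]
      rw [List.getElem_replicate]
    · by_cases h3 : j < n - 2
      · rw [if_neg (by push_neg; constructor <;> [exact_mod_cast Nat.not_lt.mp h2; omega])]
        rw [List.getElem_append_left (by simp; omega)]
        rw [List.getElem_append_right (by simp; omega)]
        rw [List.getElem_replicate]
      · rw [if_pos (Or.inr (by push_cast; omega))]
        rw [List.getElem_append_right (by simp; omega)]
        rw [List.getElem_replicate]

-- ===== VERDICT (by name: the statement is the Claim_ definition above) =====
theorem make_frame_grid_py_spec : Claim_equal_make_frame_grid_py := by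
  intro height _
  show make_frame_grid_py height = make_frame_grid_py_alt height
  simp only [make_frame_grid_py, make_frame_grid_py_alt, empty_py]
  by_cases hle : height ≤ 0
  · rw [if_pos hle]
    have h0 : PySem.List.pyRange 0 (height * 4) 1 = [] :=
      PySem.List.pyRange_one_eq_nil (by omega)
    rw [h0]; simp
  · rw [if_neg hle]
    have hpos : (1 : Int) ≤ height := by omega
    have hr : PySem.List.pyRange 0 (height * 4) 1
        = (List.range (height * 4).toNat).map (fun (k : Nat) => (k : Int)) := by
      rw [PySem.List.pyRange_one]; simp
    rw [hr, List.map_map]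
    simp only [Function.comp_def]
    rw [foldl_stepA (height * 4) (height * 4).toNat (height * 4).toNat (le_refl _)]
    have hcast : ((height * 4).toNat : Int) = height * 4 := Int.toNat_of_nonneg (by omega)
    have hn4 : 4 ≤ (height * 4).toNat := by omega
    calc (List.range (height * 4).toNat).map
          (fun k => if k < (height * 4).toNat then rowA (height * 4) k
                    else List.replicate 8 false)
        = (List.range (height * 4).toNat).map
            (fun k => rowA (((height * 4).toNat : Nat) : Int) k) := by
          apply List.map_congr_left
          intro k hk
          rw [if_pos (List.mem_range.mp hk), hcast]
      _ = _ := by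
          rw [map_rowA_blocks _ hn4]
          have h4 : (height * 4).toNat - 4 = (height * 4 - 4).toNat := by omega
          rw [h4]
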